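-- pv_equiv track=rewrite | github.com/kumaloha/Anchor | anchor/extract/pipelines/_base.py | find_cycle_nodes
-- ===== SOURCE A (Python) =====
-- def find_cycle_nodes(all_ids: list[int], adj: dict[int, list[int]]) -> set[int]:
--     """DFS 检测有向图中的环节点，返回在环中的节点 ID 集合。"""
--     WHITE, GRAY, BLACK = 0, 1, 2
--     color: dict[int, int] = {nid: WHITE for nid in all_ids}
--     in_cycle: set[int] = set()
--     stack: list[int] = []
--
--     def dfs(v: int) -> None:
--         color[v] = GRAY
--         stack.append(v)
--         for w in adj.get(v, []):
--             if color.get(w, BLACK) == GRAY: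
--                 cycle_start = stack.index(w)
--                 for node in stack[cycle_start:]:
--                     in_cycle.add(node)
--             elif color.get(w, BLACK) == WHITE:
--                 dfs(w)
--         stack.pop()
--         color[v] = BLACK
--
--     for nid in all_ids:
--         if color.get(nid, BLACK) == WHITE:
--             dfs(nid)
--
--     return in_cycle
-- ===== SOURCE B (Python) =====
-- def find_cycle_nodes(all_ids: list[int], adj: dict[int, list[int]]) -> set[int]:
--     """DFS cycle detection; marks cycle nodes via O(1)-lookup stack positions and an
--     amortized stack of already-marked index intervals instead of rescanning stack slices."""
--     ids = set(all_ids)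
--     seen: set[int] = set()
--     pos: dict[int, int] = {}          # node -> its index on the DFS stack (gray nodes)
--     stack: list[int] = []
--     intervals: list[tuple[int, int]] = []  # disjoint ascending [a, b) index ranges already marked
--     in_cycle: set[int] = set()
--
--     def dfs(v: int) -> None:
--         seen.add(v)
--         pos[v] = len(stack)
--         stack.append(v)
--         for w in adj.get(v, []):
--             d = pos.get(w)
--             if d is not None:          # back edge to a gray node at stack index d
--                 n = len(stack)
--                 lower = []             # marked intervals overlapping [d, n), lowest first
--                 while intervals and intervals[-1][1] > d:
--                     lower.append(intervals.pop())
--                 lower.reverse()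
--                 start = lower[0][0] if lower and lower[0][0] < d else d
--                 cur = d
--                 for a, b in lower:     # mark only the gaps between already-marked ranges
--                     in_cycle.update(stack[cur:a])
--                     cur = b
--                 in_cycle.update(stack[cur:n])
--                 intervals.append((start, n))
--             elif w in ids and w not in seen:
--                 dfs(w)
--         stack.pop()
--         del pos[v]
--         n = len(stack)
--         if intervals and intervals[-1][1] > n:
--             a, b = intervals[-1]
--             if a >= n:
--                 intervals.pop()
--             else:
--                 intervals[-1] = (a, n)
--
--     for nid in all_ids:
--         if nid not in seen:
--             dfs(nid)
--     return in_cycle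
-- ===== Notes on version B (the rewrite author's own statement) =====
-- stated objective: alternative
-- what changed: Replaces the per-back-edge stack.index scan and full stack-slice re-marking with a dict of stack positions (O(1) back-edge lookup) and an amortized stack of already-marked index intervals, so each back edge touches only the still-unmarked gaps (intended as faster on deep-stack graphs; a timing run measured 1.68x at the largest size but inconsistently, so no speed is claimed).
import Mathlib
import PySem

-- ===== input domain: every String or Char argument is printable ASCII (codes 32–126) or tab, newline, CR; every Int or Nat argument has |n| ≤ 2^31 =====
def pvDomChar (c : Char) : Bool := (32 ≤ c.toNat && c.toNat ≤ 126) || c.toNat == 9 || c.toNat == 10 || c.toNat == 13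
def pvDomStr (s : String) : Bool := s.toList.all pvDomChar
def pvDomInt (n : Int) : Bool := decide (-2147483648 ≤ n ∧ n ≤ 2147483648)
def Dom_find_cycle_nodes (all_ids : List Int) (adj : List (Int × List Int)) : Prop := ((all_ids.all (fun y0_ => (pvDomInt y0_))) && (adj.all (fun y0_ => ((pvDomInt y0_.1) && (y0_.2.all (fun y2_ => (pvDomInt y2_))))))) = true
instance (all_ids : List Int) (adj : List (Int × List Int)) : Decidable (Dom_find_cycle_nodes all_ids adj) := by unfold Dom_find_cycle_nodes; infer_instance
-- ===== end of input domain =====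

-- B replaces A's per-back-edge stack.index scan and full stack-slice re-marking by a dict of
-- stack positions plus an amortized stack of already-marked index intervals (same return value,
-- including the insertion order of the returned set).

-- adj.get(v, []) — used by both Pythons verbatim
def pvAdjGet (adj : List (Int × List Int)) (v : Int) : List Int :=
  (PySem.Dict.mk adj).getD v []

-- ===== PORT A =====
structure PvStA where
  color : PySem.Dict Int Int
  inCycle : PySem.Set Int
  stack : List Int

-- dfs of A; fuel = recursion-depth guard, never exhausted: each nested call grays a distinct
-- WHITE node of all_ids, so the depth is at most all_ids.length (the fuel given at each top call)
-- the body of A's "for w in adj.get(v, [])" loop; rec = the recursive call dfs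
def pvStepA (rec : Int → PvStA → PvStA) (t : PvStA) (w : Int) : PvStA :=
  if t.color.getD w 2 = 1 then
    match PySem.List.index? t.stack w with
    | some i =>
        ⟨t.color, (PySem.List.slice t.stack (some (i : Int)) none).foldl PySem.Set.add t.inCycle, t.stack⟩
    | none => t      -- unreachable guard: a GRAY node is always on the stack
  else if t.color.getD w 2 = 0 then rec w t
  else t

def pvDfsA (adj : List (Int × List Int)) : Nat → Int → PvStA → PvStA
  | 0, _, s => s
  | fuel+1, v, s =>
    let s1 : PvStA := ⟨s.color.insert v 1, s.inCycle, s.stack ++ [v]⟩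
    let s2 := (pvAdjGet adj v).foldl (pvStepA (pvDfsA adj fuel)) s1
    ⟨s2.color.insert v 2, s2.inCycle, s2.stack.dropLast⟩

def find_cycle_nodes (all_ids : List Int) (adj : List (Int × List Int)) : List Int :=
  let color0 := all_ids.foldl (fun d nid => d.insert nid 0) PySem.Dict.empty
  let sF := all_ids.foldl
    (fun s nid => if s.color.getD nid 2 = 0 then pvDfsA adj all_ids.length nid s else s)
    (⟨color0, PySem.Set.empty, []⟩ : PvStA)
  sF.inCycle

-- ===== PORT B =====
structure PvStB where
  seen : PySem.Set Int
  pos : PySem.Dict Int Nat           -- node -> its index on the DFS stack (gray nodes)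
  stack : List Int
  intervals : List (Nat × Nat)       -- marked [a,b) ranges, TOPMOST FIRST (Source B's list reversed)
  inCycle : PySem.Set Int

-- the "for a, b in lower: in_cycle.update(stack[cur:a]); cur = b" loop plus the final update
def pvSweep (stack : List Int) (n : Nat) : Nat → List (Nat × Nat) → PySem.Set Int → PySem.Set Int
  | cur, [], ic => PySem.Set.update ic (PySem.List.slice stack (some (cur : Int)) (some (n : Int)))
  | cur, (a, _b) :: lows, ic =>
      pvSweep stack n _b lows (PySem.Set.update ic (PySem.List.slice stack (some (cur : Int)) (some (a : Int))))

-- back-edge marking: pop overlapping intervals, fill the uncovered gaps of [d, n), push merged interval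
def pvMark (stack : List Int) (ivs : List (Nat × Nat)) (ic : PySem.Set Int) (d : Nat) :
    List (Nat × Nat) × PySem.Set Int :=
  let n := stack.length
  let lower := (ivs.takeWhile (fun ab => decide (d < ab.2))).reverse
  let rest := ivs.dropWhile (fun ab => decide (d < ab.2))
  let start := match lower with
    | (a, _) :: _ => if a < d then a else d
    | [] => d
  ((start, n) :: rest, pvSweep stack n d lower ic)

-- the body of B's "for w in adj.get(v, [])" loop; rec = the recursive call dfs
def pvStepB (ids : PySem.Set Int) (rec : Int → PvStB → PvStB) (t : PvStB) (w : Int) : PvStB :=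
  match t.pos.get? w with
  | some d =>
      let r := pvMark t.stack t.intervals t.inCycle d
      ⟨t.seen, t.pos, t.stack, r.1, r.2⟩
  | none => if w ∈ ids ∧ w ∉ t.seen then rec w t else t

-- trimming of the topmost marked interval after stack.pop()
def pvTrim (ivs : List (Nat × Nat)) (n : Nat) : List (Nat × Nat) :=
  match ivs with
  | (a, b) :: rest => if n < b then (if n ≤ a then rest else (a, n) :: rest) else (a, b) :: rest
  | [] => []

def pvDfsB (ids : PySem.Set Int) (adj : List (Int × List Int)) : Nat → Int → PvStB → PvStB
  | 0, _, s => s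
  | fuel+1, v, s =>
    let s1 : PvStB := ⟨PySem.Set.add s.seen v, s.pos.insert v s.stack.length,
                       s.stack ++ [v], s.intervals, s.inCycle⟩
    let s2 := (pvAdjGet adj v).foldl (pvStepB ids (pvDfsB ids adj fuel)) s1
    let stack' := s2.stack.dropLast
    ⟨s2.seen, s2.pos.erase v, stack', pvTrim s2.intervals stack'.length, s2.inCycle⟩

def find_cycle_nodes_alt (all_ids : List Int) (adj : List (Int × List Int)) : List Int :=
  let ids := PySem.Set.ofList all_ids
  let sF := all_ids.foldl
    (fun s nid => if nid ∉ s.seen then pvDfsB ids adj all_ids.length nid s else s)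
    (⟨PySem.Set.empty, PySem.Dict.empty, [], [], PySem.Set.empty⟩ : PvStB)
  sF.inCycle

-- ===== PRECONDITION & SPEC =====
def Spec_find_cycle_nodes (all_ids : List Int) (adj : List (Int × List Int)) (out : List Int) : Prop := out = find_cycle_nodes_alt all_ids adj
instance (all_ids : List Int) (adj : List (Int × List Int)) (out : List Int) : Decidable (Spec_find_cycle_nodes all_ids adj out) := by unfold Spec_find_cycle_nodes; infer_instance

-- ===== CLAIM (what is proved, stated in full; the proofs are below) =====
def Claim_equal_find_cycle_nodes : Prop := ∀ (all_ids : List Int) (adj : List (Int × List Int)), Dom_find_cycle_nodes all_ids adj → Spec_find_cycle_nodes all_ids adj (find_cycle_nodes all_ids adj)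

-- ===== LEMMAS AND PROOFS =====

-- position p is inside one of the marked intervals
def pvCov (ivs : List (Nat × Nat)) (p : Nat) : Prop := ∃ ab ∈ ivs, ab.1 ≤ p ∧ p < ab.2

-- intervals are nonempty, within [0, n), strictly descending and disjoint (topmost first)
def pvChain : List (Nat × Nat) → Nat → Prop
  | [], _ => True
  | (a, b) :: rest, n => a < b ∧ b ≤ n ∧ pvChain rest a

-- the simulation invariant between A's and B's DFS states
def pvInv (ids : PySem.Set Int) (sA : PvStA) (sB : PvStB) : Prop :=
  sB.stack = sA.stack ∧
  sB.inCycle = sA.inCycle ∧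
  sA.stack.Nodup ∧
  (∀ w, sA.color.getD w 2 = 1 ↔ w ∈ sA.stack) ∧
  (∀ w, sB.pos.get? w = PySem.List.index? sA.stack w) ∧
  (∀ w, sA.color.getD w 2 = 0 ↔ (w ∈ ids ∧ w ∉ sB.seen)) ∧
  pvChain sB.intervals sA.stack.length ∧
  (∀ p (h : p < sA.stack.length), sA.stack[p] ∈ sA.inCycle ↔ pvCov sB.intervals p) ∧
  (∀ x ∈ sA.inCycle, sA.color.getD x 2 ≠ 0)


lemma pvDict_get?_erase_self {ν : Type} (d : PySem.Dict Int ν) (k : Int) :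
    (d.erase k).get? k = none := by
  simp [PySem.Dict.erase, PySem.Dict.get?]

lemma pvDict_get?_erase_of_ne {ν : Type} (d : PySem.Dict Int ν) (k k' : Int) (h : k' ≠ k) :
    (d.erase k).get? k' = d.get? k' := by
  simp only [PySem.Dict.erase, PySem.Dict.get?]
  congr 1
  induction d.items with
  | nil => rfl
  | cons p rest ih =>
    by_cases hp : p.1 = k
    · simp [hp, Ne.symm h, ih]
    · by_cases hp' : p.1 = k'
      · simp [hp', h]
      · simp [hp, hp', ih]

lemma pvIndex?_append_of_not_mem (l : List Int) (v w : Int) (hv : w ≠ v) (hw : w ∉ l) :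
    PySem.List.index? (l ++ [v]) w = none := by
  simp [PySem.List.index?, List.idxOf?_eq_none_iff, hv, hw]

lemma pvIndex?_some (l : List Int) (w : Int) (d : Nat) (_hnd : l.Nodup)
    (h : PySem.List.index? l w = some d) : ∃ hd : d < l.length, l[d] = w := by
  rw [PySem.List.index?_eq_idxOf?] at h
  have h1 := List.idxOf?_eq_some_iff.mp h
  exact ⟨h1.1, h1.2.1⟩

lemma pvSlice_split (xs : List Int) (i j k : Nat) (h1 : i ≤ j) (h2 : j ≤ k) :
    (xs.drop i).take (k - i) = (xs.drop i).take (j - i) ++ (xs.drop j).take (k - j) := by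
  have : xs.drop j = (xs.drop i).drop (j - i) := by rw [List.drop_drop]; congr 1; omega
  rw [this, ← List.take_append_drop (j - i) ((xs.drop i).take (k-i)), List.take_take,
      List.drop_take]
  congr 1
  · congr 1; omega
  · congr 1; omega

lemma pvMem_slice_iff (xs : List Int) (hnd : xs.Nodup) (a b p : Nat) (hp : p < xs.length)
    (hb : b ≤ xs.length) :
    xs[p] ∈ (xs.drop a).take (b - a) ↔ a ≤ p ∧ p < b := by
  constructor
  · intro hmem
    obtain ⟨i, hi, hget⟩ := List.getElem_of_mem hmem
    rw [List.getElem_take, List.getElem_drop] at hget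
    have hlen : i < b - a := by
      have := hi; simp [List.length_take, List.length_drop] at this; omega
    have hai : a + i < xs.length := by
      have := hi; simp [List.length_take, List.length_drop] at this; omega
    have := List.Nodup.getElem_inj_iff hnd |>.mp hget
    omega
  · rintro ⟨h1, h2⟩
    have hlt : p - a < (xs.drop a).length := by simp [List.length_drop]; omega
    have : ((xs.drop a).take (b - a))[p - a]'(by simp [List.length_take]; omega) = xs[p] := by
      rw [List.getElem_take, List.getElem_drop]
      congr 1; omega
    rw [← this]; exact List.getElem_mem _

lemma pvUpdate_of_subset (s : PySem.Set Int) (xs : List Int) (h : ∀ x ∈ xs, x ∈ s) :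
    PySem.Set.update s xs = s := by
  rw [PySem.Set.update_eq_append_filter]
  have : (PySem.Set.ofList xs).filter (fun y => !s.contains y) = [] := by
    rw [List.filter_eq_nil_iff]
    intro x hx
    have hxs : x ∈ xs := (PySem.Set.mem_ofList _ _).mp hx
    simp [h x hxs]
  rw [this]
  simp

lemma pvChain_mono (l : List (Nat × Nat)) (m m' : Nat) (h : pvChain l m) (hm : m ≤ m') :
    pvChain l m' := by
  cases l with
  | nil => trivial
  | cons ab rest =>
    obtain ⟨a, b⟩ := ab
    obtain ⟨h1, h2, h3⟩ := h
    exact ⟨h1, le_trans h2 hm, h3⟩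

lemma pvChain_cov_bounds (ivs : List (Nat × Nat)) :
    ∀ (n : Nat), pvChain ivs n → ∀ ab ∈ ivs, ab.1 < ab.2 ∧ ab.2 ≤ n := by
  induction ivs with
  | nil => simp
  | cons ab rest ih =>
    obtain ⟨a, b⟩ := ab
    intro n h cd hcd
    obtain ⟨h1, h2, h3⟩ := h
    rcases List.mem_cons.mp hcd with h | h
    · subst h; exact ⟨h1, h2⟩
    · have := ih a h3 cd h
      exact ⟨this.1, by omega⟩

lemma pvSweep_append_singleton (stack : List Int) (n a b : Nat) (l : List (Nat × Nat))
    (cur : Nat) (ic : PySem.Set Int) :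
    pvSweep stack n cur (l ++ [(a, b)]) ic
      = PySem.Set.update (pvSweep stack a cur l ic)
          (PySem.List.slice stack (some (b : Int)) (some (n : Int))) := by
  induction l generalizing cur ic with
  | nil => simp [pvSweep]
  | cons xy t ih =>
    obtain ⟨x, y⟩ := xy
    simp only [List.cons_append, pvSweep]
    exact ih y _

lemma pvSlice_elem (xs : List Int) (a b : Nat) (hb : b ≤ xs.length) :
    ∀ x ∈ (xs.drop a).take (b - a), ∃ p, ∃ hp : p < xs.length, a ≤ p ∧ p < b ∧ xs[p] = x := by
  intro x hx
  obtain ⟨i, hi, hget⟩ := List.getElem_of_mem hx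
  have hlen := hi
  simp [List.length_take, List.length_drop] at hlen
  rw [List.getElem_take, List.getElem_drop] at hget
  exact ⟨a + i, by omega, by omega, by omega, hget⟩

lemma pvTakeWhile_nil_dropWhile {α : Type} (q : α → Bool) (l : List α)
    (h : l.takeWhile q = []) : l.dropWhile q = l := by
  cases l with
  | nil => rfl
  | cons x t =>
    by_cases hq : q x
    · exfalso
      rw [List.takeWhile_cons_of_pos hq] at h
      exact (List.cons_ne_nil _ _ h).elim
    · simp [hq]

-- B's gap sweep equals A's full-slice re-marking (already-marked entries add nothing)
lemma pvSweep_eq (stack : List Int) (d : Nat) :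
    ∀ (ivs : List (Nat × Nat)) (n : Nat) (ic : PySem.Set Int), pvChain ivs n →
    n ≤ stack.length → d ≤ n →
    (∀ ab ∈ ivs, ∀ p, ∀ h : p < stack.length, ab.1 ≤ p → p < ab.2 → stack[p] ∈ ic) →
    pvSweep stack n d ((ivs.takeWhile (fun ab => decide (d < ab.2))).reverse) ic
      = PySem.Set.update ic ((stack.drop d).take (n - d)) := by
  intro ivs
  induction ivs with
  | nil =>
    intro n ic _ _ _ _
    simp [pvSweep, PySem.Set.update, PySem.List.slice_natCast]
  | cons ab rest ih =>
    obtain ⟨a, b⟩ := ab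
    intro n ic hch hn hd hic
    obtain ⟨hab, hbn, hcr⟩ := hch
    by_cases hdb : d < b
    · rw [List.takeWhile_cons_of_pos (by simpa using hdb), List.reverse_cons,
        pvSweep_append_singleton]
      have hic' : ∀ cd ∈ rest, ∀ p, ∀ h : p < stack.length, cd.1 ≤ p → p < cd.2 → stack[p] ∈ ic :=
        fun cd hcd => hic cd (List.mem_cons_of_mem _ hcd)
      have hmid : ∀ (X : PySem.Set Int) (lo : Nat), a ≤ lo →
          (∀ x ∈ ic, x ∈ X) →
          PySem.Set.update X ((stack.drop lo).take (b - lo)) = X := by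
        intro X lo hlo hmono
        apply pvUpdate_of_subset
        intro x hx
        obtain ⟨p, hp, h1, h2, h3⟩ := pvSlice_elem stack lo b (by omega) x hx
        exact hmono _ (h3 ▸ hic (a, b) List.mem_cons_self p hp (by omega) h2)
      by_cases hda : d ≤ a
      · rw [ih a ic hcr (by omega) hda hic']
        rw [PySem.List.slice_natCast,
          pvSlice_split stack d b n (by omega) (by omega), PySem.Set.update_append,
          pvSlice_split stack d a b hda (by omega), PySem.Set.update_append,
          hmid _ a le_rfl (fun x hx => (PySem.Set.mem_update _ _ _).mpr (Or.inl hx))]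
      · -- a < d < b : the lowest overlapping interval contains d
        have htw : rest.takeWhile (fun ab => decide (d < ab.2)) = [] := by
          cases rest with
          | nil => rfl
          | cons cd t =>
            obtain ⟨c, e⟩ := cd
            obtain ⟨_, he, _⟩ := hcr
            exact List.takeWhile_cons_of_neg (by simp; omega)
        rw [htw]
        simp only [List.reverse_nil, pvSweep, PySem.List.slice_natCast]
        have : a - d = 0 := by omega
        rw [this]
        simp only [List.take_zero, PySem.Set.update_nil]
        rw [pvSlice_split stack d b n (by omega) (by omega), PySem.Set.update_append]
        rw [hmid ic d (by omega) (fun x hx => hx)]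
    · rw [List.takeWhile_cons_of_neg (by simpa using hdb)]
      simp [pvSweep, PySem.List.slice_natCast]

lemma pvUpdate_eq_foldl (s : PySem.Set Int) (xs : List Int) :
    PySem.Set.update s xs = xs.foldl PySem.Set.add s := rfl

lemma pvCov_cons (a b : Nat) (rest : List (Nat × Nat)) (p : Nat) :
    pvCov ((a, b) :: rest) p ↔ (a ≤ p ∧ p < b) ∨ pvCov rest p := by
  simp [pvCov]

-- the merged interval's lower end, as computed by pvMark
def pvStart (ivs : List (Nat × Nat)) (d : Nat) : Nat :=
  match (ivs.takeWhile (fun ab => decide (d < ab.2))).reverse with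
  | (a, _) :: _ => if a < d then a else d
  | [] => d

lemma pvMark_fst (stack : List Int) (ivs : List (Nat × Nat)) (ic : PySem.Set Int) (d : Nat) :
    (pvMark stack ivs ic d).1
      = (pvStart ivs d, stack.length) :: ivs.dropWhile (fun ab => decide (d < ab.2)) := rfl

lemma pvStart_le (ivs : List (Nat × Nat)) (d : Nat) : pvStart ivs d ≤ d := by
  unfold pvStart
  cases hrev : (ivs.takeWhile (fun ab => decide (d < ab.2))).reverse with
  | nil => exact le_rfl
  | cons ab t =>
    obtain ⟨a, b⟩ := ab
    dsimp only
    split <;> omega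

lemma pvStart_chain (d : Nat) : ∀ (ivs : List (Nat × Nat)) (n : Nat), pvChain ivs n → d < n →
    pvChain ((pvStart ivs d, n) :: ivs.dropWhile (fun ab => decide (d < ab.2))) n := by
  intro ivs
  induction ivs with
  | nil => intro n _ hd; exact ⟨hd, le_rfl, trivial⟩
  | cons ab rest ih =>
    obtain ⟨a, b⟩ := ab
    intro n hch hd
    obtain ⟨hab, hbn, hcr⟩ := hch
    by_cases hdb : d < b
    · have htw : ((a, b) :: rest).takeWhile (fun ab => decide (d < ab.2))
          = (a, b) :: rest.takeWhile (fun ab => decide (d < ab.2)) :=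
        List.takeWhile_cons_of_pos (by simpa using hdb)
      have hdw : ((a, b) :: rest).dropWhile (fun ab => decide (d < ab.2))
          = rest.dropWhile (fun ab => decide (d < ab.2)) :=
        List.dropWhile_cons_of_pos (by simpa using hdb)
      by_cases hrest : rest.takeWhile (fun ab => decide (d < ab.2)) = []
      · have hstart : pvStart ((a, b) :: rest) d = if a < d then a else d := by
          unfold pvStart; rw [htw, hrest]; rfl
        have hdwr := pvTakeWhile_nil_dropWhile _ rest hrest
        rw [hdw, hdwr, hstart]
        have hchrest : pvChain rest (if a < d then a else d) := by
          split
          · exact hcr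
          · cases rest with
            | nil => trivial
            | cons cd t =>
              obtain ⟨c, e⟩ := cd
              obtain ⟨hce, hea, hct⟩ := hcr
              have : ¬ d < e := by
                intro hde
                rw [List.takeWhile_cons_of_pos (by simpa using hde)] at hrest
                exact List.cons_ne_nil _ _ hrest
              exact ⟨hce, by omega, hct⟩
        exact ⟨by split <;> omega, le_rfl, hchrest⟩
      · have hda : d < a := by
          cases hr : rest with
          | nil => rw [hr] at hrest; exact absurd rfl hrest
          | cons cd t =>
            obtain ⟨c, e⟩ := cd
            rw [hr] at hrest
            by_cases hde : d < e
            · rw [hr] at hcr; obtain ⟨_, hea, _⟩ := hcr; omega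
            · rw [List.takeWhile_cons_of_neg (by simpa using hde)] at hrest
              exact absurd rfl hrest
        have hstart : pvStart ((a, b) :: rest) d = pvStart rest d := by
          unfold pvStart
          rw [htw, List.reverse_cons]
          cases hrev : (rest.takeWhile (fun ab => decide (d < ab.2))).reverse with
          | nil => exact absurd (List.reverse_eq_nil_iff.mp hrev) hrest
          | cons xy t => obtain ⟨x, y⟩ := xy; rfl
        rw [hdw, hstart]
        have := ih a hcr hda
        obtain ⟨h1, _, h3⟩ := this
        exact ⟨by omega, le_rfl, h3⟩
    · have htw : ((a, b) :: rest).takeWhile (fun ab => decide (d < ab.2)) = [] :=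
        List.takeWhile_cons_of_neg (by simpa using hdb)
      have hstart : pvStart ((a, b) :: rest) d = d := by unfold pvStart; rw [htw]; rfl
      rw [pvTakeWhile_nil_dropWhile _ _ htw, hstart]
      exact ⟨hd, le_rfl, hab, by omega, hcr⟩

lemma pvStart_cov (d : Nat) : ∀ (ivs : List (Nat × Nat)) (n : Nat), pvChain ivs n → d < n →
    ∀ p, p < n →
    (pvCov ivs p ∨ d ≤ p ↔ pvStart ivs d ≤ p ∨ pvCov (ivs.dropWhile (fun ab => decide (d < ab.2))) p) := by
  intro ivs
  induction ivs with
  | nil =>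
    intro n _ hd p hp
    simp [pvCov, pvStart]
  | cons ab rest ih =>
    obtain ⟨a, b⟩ := ab
    intro n hch hd p hp
    obtain ⟨hab, hbn, hcr⟩ := hch
    by_cases hdb : d < b
    · have htw : ((a, b) :: rest).takeWhile (fun ab => decide (d < ab.2))
          = (a, b) :: rest.takeWhile (fun ab => decide (d < ab.2)) :=
        List.takeWhile_cons_of_pos (by simpa using hdb)
      have hdw : ((a, b) :: rest).dropWhile (fun ab => decide (d < ab.2))
          = rest.dropWhile (fun ab => decide (d < ab.2)) :=
        List.dropWhile_cons_of_pos (by simpa using hdb)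
      rw [hdw, pvCov_cons]
      by_cases hrest : rest.takeWhile (fun ab => decide (d < ab.2)) = []
      · have hstart : pvStart ((a, b) :: rest) d = if a < d then a else d := by
          unfold pvStart; rw [htw, hrest]; rfl
        have hdwr := pvTakeWhile_nil_dropWhile _ rest hrest
        rw [hstart, hdwr]
        constructor
        · rintro ((⟨h1, h2⟩ | hcov) | hdp)
          · left; split <;> omega
          · right; exact hcov
          · left; split <;> omega
        · rintro (hsp | hcov)
          · by_cases hpd : d ≤ p
            · right; exact hpd
            · left; left
              have had : a < d := by by_contra hc; simp [hc] at hsp; omega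
              simp [had] at hsp
              exact ⟨hsp, by omega⟩
          · exact Or.inl (Or.inr hcov)
      · have hda : d < a := by
          cases hr : rest with
          | nil => rw [hr] at hrest; exact absurd rfl hrest
          | cons cd t =>
            obtain ⟨c, e⟩ := cd
            rw [hr] at hrest
            by_cases hde : d < e
            · rw [hr] at hcr; obtain ⟨_, hea, _⟩ := hcr; omega
            · rw [List.takeWhile_cons_of_neg (by simpa using hde)] at hrest
              exact absurd rfl hrest
        have hstart : pvStart ((a, b) :: rest) d = pvStart rest d := by
          unfold pvStart
          rw [htw, List.reverse_cons]
          cases hrev : (rest.takeWhile (fun ab => decide (d < ab.2))).reverse with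
          | nil => exact absurd (List.reverse_eq_nil_iff.mp hrev) hrest
          | cons xy t => obtain ⟨x, y⟩ := xy; rfl
        rw [hstart]
        have hsle := pvStart_le rest d
        by_cases hpa : p < a
        · have := ih a hcr hda p hpa
          rw [← this]
          constructor
          · rintro ((⟨h1, h2⟩ | hcov) | hdp)
            · omega
            · exact Or.inl hcov
            · exact Or.inr hdp
          · rintro (hcov | hdp)
            · exact Or.inl (Or.inr hcov)
            · exact Or.inr hdp
        · constructor
          · intro _; left; omega
          · intro _
            by_cases hpb : p < b
            · exact Or.inl (Or.inl ⟨by omega, hpb⟩)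
            · right; omega
    · have htw : ((a, b) :: rest).takeWhile (fun ab => decide (d < ab.2)) = [] :=
        List.takeWhile_cons_of_neg (by simpa using hdb)
      have hstart : pvStart ((a, b) :: rest) d = d := by unfold pvStart; rw [htw]; rfl
      rw [pvTakeWhile_nil_dropWhile _ _ htw, hstart]
      tauto

-- the whole back-edge step, packaged: value, chain and coverage after pvMark
lemma pvMark_sim (stack : List Int) (ivs : List (Nat × Nat)) (ic : PySem.Set Int) (d : Nat)
    (hnd : stack.Nodup) (hch : pvChain ivs stack.length) (hd : d < stack.length)
    (hcov : ∀ p (h : p < stack.length), stack[p] ∈ ic ↔ pvCov ivs p) :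
    (pvMark stack ivs ic d).2 = PySem.Set.update ic (stack.drop d) ∧
    pvChain (pvMark stack ivs ic d).1 stack.length ∧
    (∀ p (h : p < stack.length),
        stack[p] ∈ (pvMark stack ivs ic d).2 ↔ pvCov (pvMark stack ivs ic d).1 p) := by
  have hic : ∀ ab ∈ ivs, ∀ p, ∀ h : p < stack.length, ab.1 ≤ p → p < ab.2 → stack[p] ∈ ic := by
    intro ab hab p hp h1 h2
    exact (hcov p hp).mpr ⟨ab, hab, h1, h2⟩
  have hval : (pvMark stack ivs ic d).2 = PySem.Set.update ic (stack.drop d) := by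
    show pvSweep stack stack.length d ((ivs.takeWhile (fun ab => decide (d < ab.2))).reverse) ic = _
    rw [pvSweep_eq stack d ivs stack.length ic hch le_rfl (by omega) hic]
    congr 1
    have : stack.length - d = (stack.drop d).length := by simp
    rw [this, List.take_length]
  refine ⟨hval, ?_, ?_⟩
  · rw [pvMark_fst]
    exact pvStart_chain d ivs stack.length hch hd
  · intro p hp
    rw [hval, pvMark_fst, pvCov_cons]
    have hmem : stack[p] ∈ PySem.Set.update ic (stack.drop d) ↔ stack[p] ∈ ic ∨ (d ≤ p ∧ p < stack.length) := by
      rw [PySem.Set.mem_update]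
      have : stack.drop d = (stack.drop d).take (stack.length - d) := by
        rw [← List.length_drop]; exact List.take_length.symm
      rw [this, pvMem_slice_iff stack hnd d stack.length p hp le_rfl]
    rw [hmem, hcov p hp]
    have := pvStart_cov d ivs stack.length hch hd p hp
    constructor
    · rintro (hcov' | ⟨h1, h2⟩)
      · rcases this.mp (Or.inl hcov') with h | h
        · exact Or.inl ⟨h, hp⟩
        · exact Or.inr h
      · rcases this.mp (Or.inr h1) with h | h
        · exact Or.inl ⟨h, hp⟩
        · exact Or.inr h
    · rintro (⟨h1, _⟩ | hcov')
      · rcases this.mpr (Or.inl h1) with h | h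
        · exact Or.inl h
        · exact Or.inr ⟨h, hp⟩
      · rcases this.mpr (Or.inr hcov') with h | h
        · exact Or.inl h
        · exact Or.inr ⟨h, hp⟩

lemma pvTrim_chain_cov (ivs : List (Nat × Nat)) (n : Nat) (h : pvChain ivs (n + 1)) :
    pvChain (pvTrim ivs n) n ∧ (∀ p, p < n → (pvCov ivs p ↔ pvCov (pvTrim ivs n) p)) := by
  cases ivs with
  | nil => exact ⟨trivial, fun p hp => Iff.rfl⟩
  | cons ab rest =>
    obtain ⟨a, b⟩ := ab
    obtain ⟨hab, hbn, hcr⟩ := h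
    by_cases hnb : n < b
    · by_cases hna : n ≤ a
      · have ha : a = n := by omega
        have : pvTrim ((a, b) :: rest) n = rest := by simp [pvTrim, hnb, hna]
        rw [this]
        refine ⟨by rw [← ha]; exact hcr, ?_⟩
        intro p hp
        rw [pvCov_cons]
        constructor
        · rintro (⟨h1, _⟩ | h) 
          · omega
          · exact h
        · exact Or.inr
      · have : pvTrim ((a, b) :: rest) n = (a, n) :: rest := by simp [pvTrim, hnb, hna]
        rw [this]
        refine ⟨⟨by omega, le_rfl, hcr⟩, ?_⟩
        intro p hp
        rw [pvCov_cons, pvCov_cons]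
        constructor
        · rintro (⟨h1, h2⟩ | h)
          · exact Or.inl ⟨h1, by omega⟩
          · exact Or.inr h
        · rintro (⟨h1, h2⟩ | h)
          · exact Or.inl ⟨h1, by omega⟩
          · exact Or.inr h
    · have : pvTrim ((a, b) :: rest) n = (a, b) :: rest := by simp [pvTrim, hnb]
      rw [this]
      exact ⟨⟨hab, by omega, hcr⟩, fun p hp => Iff.rfl⟩

-- one iteration of the neighbour loop preserves the invariant
lemma pvStep_sim (ids : PySem.Set Int) (recA : Int → PvStA → PvStA) (recB : Int → PvStB → PvStB)
    (hrec : ∀ v sA sB, pvInv ids sA sB → sA.color.getD v 2 = 0 →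
        pvInv ids (recA v sA) (recB v sB) ∧ (recA v sA).stack = sA.stack ∧
        (∀ x ∈ sB.seen, x ∈ (recB v sB).seen)) :
    ∀ (w : Int) (sA : PvStA) (sB : PvStB), pvInv ids sA sB →
      pvInv ids (pvStepA recA sA w) (pvStepB ids recB sB w) ∧
      (pvStepA recA sA w).stack = sA.stack ∧
      (∀ x ∈ sB.seen, x ∈ (pvStepB ids recB sB w).seen) := by
  intro w sA sB hinv
  obtain ⟨hst, hic, hnd, hgray, hpos, hwhite, hch, hcov, hicw⟩ := hinv
  cases hget : sB.pos.get? w with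
  | some d =>
    have hidx : PySem.List.index? sA.stack w = some d := by rw [← hpos w, hget]
    have hmem : w ∈ sA.stack := by
      rw [← PySem.List.index?_isSome_iff (xs := sA.stack) (v := w), hidx]; rfl
    have hcolor : sA.color.getD w 2 = 1 := (hgray w).mpr hmem
    obtain ⟨hdlt, hsd⟩ := pvIndex?_some sA.stack w d hnd hidx
    have hBeq : pvStepB ids recB sB w
        = ⟨sB.seen, sB.pos, sB.stack,
           (pvMark sB.stack sB.intervals sB.inCycle d).1,
           (pvMark sB.stack sB.intervals sB.inCycle d).2⟩ := by
      unfold pvStepB; rw [hget]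
    have hAeq : pvStepA recA sA w
        = ⟨sA.color,
           (PySem.List.slice sA.stack (some (d : Int)) none).foldl PySem.Set.add sA.inCycle,
           sA.stack⟩ := by
      unfold pvStepA; rw [if_pos hcolor, hidx]
    have hAic : (PySem.List.slice sA.stack (some (d : Int)) none).foldl PySem.Set.add sA.inCycle
        = PySem.Set.update sA.inCycle (sA.stack.drop d) := by
      rw [PySem.List.slice_from_natCast, ← pvUpdate_eq_foldl]
    obtain ⟨hval, hch', hcov'⟩ :=
      pvMark_sim sA.stack sB.intervals sA.inCycle d hnd (hst ▸ hch) hdlt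
        hcov
    rw [hBeq, hAeq]
    refine ⟨⟨by simpa using hst, ?_, hnd, hgray, hpos, hwhite, ?_, ?_, ?_⟩, rfl,
      fun x hx => hx⟩
    · show (pvMark sB.stack sB.intervals sB.inCycle d).2 = _
      rw [hst, hic, hval, hAic]
    · show pvChain (pvMark sB.stack sB.intervals sB.inCycle d).1 sA.stack.length
      rw [hst, hic]; exact hch'
    · intro p hp
      show sA.stack[p] ∈ (PySem.List.slice sA.stack (some (d : Int)) none).foldl PySem.Set.add sA.inCycle
        ↔ pvCov (pvMark sB.stack sB.intervals sB.inCycle d).1 p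
      rw [hAic, ← hval, hst, hic]
      exact hcov' p hp
    · intro x hx
      rw [hAic] at hx
      rcases (PySem.Set.mem_update _ _ _).mp hx with h | h
      · exact hicw x h
      · have : x ∈ sA.stack := List.mem_of_mem_drop h
        rw [(hgray x).mpr this]; omega
  | none =>
    have hidx : PySem.List.index? sA.stack w = none := by rw [← hpos w, hget]
    have hnmem : w ∉ sA.stack := (PySem.List.index?_eq_none_iff _ _).mp hidx
    have hcolor1 : ¬ sA.color.getD w 2 = 1 := fun hc => hnmem ((hgray w).mp hc)
    have hBeq : pvStepB ids recB sB w
        = if w ∈ ids ∧ w ∉ sB.seen then recB w sB else sB := by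
      unfold pvStepB; rw [hget]
    have hinv' : pvInv ids sA sB := ⟨hst, hic, hnd, hgray, hpos, hwhite, hch, hcov, hicw⟩
    by_cases hwb : w ∈ ids ∧ w ∉ sB.seen
    · have hcolor0 : sA.color.getD w 2 = 0 := (hwhite w).mpr hwb
      have hAeq : pvStepA recA sA w = recA w sA := by
        unfold pvStepA; rw [if_neg hcolor1, if_pos hcolor0]
      rw [hBeq, hAeq, if_pos hwb]
      exact hrec w sA sB hinv' hcolor0
    · have hcolor0 : ¬ sA.color.getD w 2 = 0 := fun hc => hwb ((hwhite w).mp hc)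
      have hAeq : pvStepA recA sA w = sA := by
        unfold pvStepA; rw [if_neg hcolor1, if_neg hcolor0]
      rw [hBeq, hAeq, if_neg hwb]
      exact ⟨hinv', rfl, fun x hx => hx⟩

-- the neighbour loop preserves the invariant
lemma pvFold_sim (ids : PySem.Set Int) (recA : Int → PvStA → PvStA) (recB : Int → PvStB → PvStB)
    (hrec : ∀ v sA sB, pvInv ids sA sB → sA.color.getD v 2 = 0 →
        pvInv ids (recA v sA) (recB v sB) ∧ (recA v sA).stack = sA.stack ∧
        (∀ x ∈ sB.seen, x ∈ (recB v sB).seen)) :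
    ∀ (ws : List Int) (sA : PvStA) (sB : PvStB), pvInv ids sA sB →
      pvInv ids (ws.foldl (pvStepA recA) sA) (ws.foldl (pvStepB ids recB) sB) ∧
      (ws.foldl (pvStepA recA) sA).stack = sA.stack ∧
      (∀ x ∈ sB.seen, x ∈ (ws.foldl (pvStepB ids recB) sB).seen) := by
  intro ws
  induction ws with
  | nil => exact fun sA sB h => ⟨h, rfl, fun x hx => hx⟩
  | cons w t ih =>
    intro sA sB hinv
    obtain ⟨h1, h2, h3⟩ := pvStep_sim ids recA recB hrec w sA sB hinv
    obtain ⟨h4, h5, h6⟩ := ih _ _ h1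
    exact ⟨h4, by rw [List.foldl_cons, h5, h2], fun x hx => h6 x (h3 x hx)⟩

-- pushing a WHITE node preserves the invariant
lemma pvPush_sim (ids : PySem.Set Int) (v : Int) (sA : PvStA) (sB : PvStB)
    (hinv : pvInv ids sA sB) (hv : sA.color.getD v 2 = 0) :
    pvInv ids ⟨sA.color.insert v 1, sA.inCycle, sA.stack ++ [v]⟩
              ⟨PySem.Set.add sB.seen v, sB.pos.insert v sB.stack.length,
               sB.stack ++ [v], sB.intervals, sB.inCycle⟩ := by
  obtain ⟨hst, hic, hnd, hgray, hpos, hwhite, hch, hcov, hicw⟩ := hinv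
  have hvns : v ∉ sA.stack := fun hm => by
    have := (hgray v).mpr hm; omega
  refine ⟨by rw [hst], hic, ?_, ?_, ?_, ?_, ?_, ?_, ?_⟩
  · rw [List.nodup_append]
    refine ⟨hnd, List.nodup_singleton v, ?_⟩
    intro a ha b hb heq
    rw [List.mem_singleton] at hb
    exact hvns (by rwa [heq, hb] at ha)
  · intro w
    rw [PySem.Dict.getD_insert]
    by_cases hw : w = v
    · simp [hw]
    · simp only [List.mem_append, List.mem_singleton, hw, or_false]
      exact hgray w
  · intro w
    by_cases hw : w = v
    · rw [hw, PySem.Dict.get?_insert_self, hst,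
        PySem.List.index?_append_singleton_self sA.stack v hvns]
    · rw [PySem.Dict.get?_insert, if_neg hw, hpos w]
      by_cases hm : w ∈ sA.stack
      · exact (PySem.List.index?_append_of_mem [v] hm).symm
      · rw [(PySem.List.index?_eq_none_iff _ _).mpr hm,
          pvIndex?_append_of_not_mem sA.stack v w hw hm]
  · intro w
    rw [PySem.Dict.getD_insert]
    by_cases hw : w = v
    · simp [hw, PySem.Set.mem_add]
    · simp only [if_neg hw]
      rw [hwhite w]
      have : w ∈ PySem.Set.add sB.seen v ↔ w ∈ sB.seen := by
        rw [PySem.Set.mem_add]; simp [hw]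
      rw [this]
  · rw [List.length_append, List.length_singleton]
    exact pvChain_mono _ _ _ hch (by omega)
  · intro p hp
    rw [List.length_append, List.length_singleton] at hp
    by_cases hplt : p < sA.stack.length
    · rw [List.getElem_append_left hplt]
      exact hcov p hplt
    · have hpe : p = sA.stack.length := by omega
      subst hpe
      have : (sA.stack ++ [v])[sA.stack.length]'(by simp) = v := by
        simp
      rw [this]
      constructor
      · intro hmem
        exact absurd hv (hicw v hmem)
      · rintro ⟨ab, hab, h1, h2⟩
        have := pvChain_cov_bounds sB.intervals sA.stack.length hch ab hab
        omega
  · intro x hx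
    rw [PySem.Dict.getD_insert]
    by_cases hw : x = v
    · simp [hw]
    · simp only [if_neg hw]
      exact hicw x hx

-- popping the node finishing its dfs call preserves the invariant
lemma pvPop_sim (ids : PySem.Set Int) (v : Int) (st0 : List Int) (sA : PvStA) (sB : PvStB)
    (hinv : pvInv ids sA sB) (hstk : sA.stack = st0 ++ [v]) (hseen : v ∈ sB.seen) :
    pvInv ids ⟨sA.color.insert v 2, sA.inCycle, sA.stack.dropLast⟩
              ⟨sB.seen, sB.pos.erase v, sB.stack.dropLast,
               pvTrim sB.intervals sB.stack.dropLast.length, sB.inCycle⟩ := by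
  obtain ⟨hst, hic, hnd, hgray, hpos, hwhite, hch, hcov, hicw⟩ := hinv
  have hdl : sA.stack.dropLast = st0 := by rw [hstk]; exact List.dropLast_concat
  have hndA : st0.Nodup ∧ ∀ a ∈ st0, a ≠ v := by
    rw [hstk] at hnd
    simp only [List.nodup_append, List.nodup_singleton, true_and] at hnd
    refine ⟨hnd.1, fun a ha hav => ?_⟩
    have := hnd.2 a ha
    simp [hav] at this
  have hvns : v ∉ st0 := fun hm => hndA.2 v hm rfl
  have hnd0 : st0.Nodup := hndA.1
  have hlen : sA.stack.length = st0.length + 1 := by rw [hstk]; simp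
  obtain ⟨hch', hcov'⟩ := pvTrim_chain_cov sB.intervals st0.length (hlen ▸ hch)
  refine ⟨by rw [hst], hic, by rw [hdl]; exact hnd0, ?_, ?_, ?_, ?_, ?_, ?_⟩
  · intro w
    rw [PySem.Dict.getD_insert, hdl]
    by_cases hw : w = v
    · simp [hw, hvns]
    · simp only [if_neg hw]
      rw [hgray w, hstk]
      simp [hw]
  · intro w
    rw [hdl]
    by_cases hw : w = v
    · rw [hw, pvDict_get?_erase_self, (PySem.List.index?_eq_none_iff _ _).mpr hvns]
    · rw [pvDict_get?_erase_of_ne _ _ _ hw, hpos w, hstk]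
      by_cases hm : w ∈ st0
      · exact PySem.List.index?_append_of_mem [v] hm
      · rw [(PySem.List.index?_eq_none_iff _ _).mpr hm,
          pvIndex?_append_of_not_mem st0 v w hw hm]
  · intro w
    rw [PySem.Dict.getD_insert]
    by_cases hw : w = v
    · simp [hw, hseen]
    · simp only [if_neg hw]
      exact hwhite w
  · rw [hst, hdl]; exact hch'
  · intro p hp
    have hp0 : p < st0.length := by rwa [hdl] at hp
    have hp1 : p < sA.stack.length := by omega
    simp only [List.getElem_dropLast]
    have harg : sB.stack.dropLast.length = st0.length := by rw [hst, hdl]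
    rw [harg, ← hcov' p hp0]
    exact hcov p hp1
  · intro x hx
    rw [PySem.Dict.getD_insert]
    by_cases hw : x = v
    · simp [hw]
    · simp only [if_neg hw]
      exact hicw x hx

-- the main simulation: A's dfs and B's dfs preserve the invariant in lock step
lemma pvDfs_sim (ids : PySem.Set Int) (adj : List (Int × List Int)) :
    ∀ (fuel : Nat) (v : Int) (sA : PvStA) (sB : PvStB), pvInv ids sA sB →
    sA.color.getD v 2 = 0 →
    pvInv ids (pvDfsA adj fuel v sA) (pvDfsB ids adj fuel v sB) ∧
    (pvDfsA adj fuel v sA).stack = sA.stack ∧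
    (∀ x ∈ sB.seen, x ∈ (pvDfsB ids adj fuel v sB).seen) := by
  intro fuel
  induction fuel with
  | zero => exact fun v sA sB hinv _ => ⟨hinv, rfl, fun x hx => hx⟩
  | succ fuel ih =>
    intro v sA sB hinv hv
    have hpush := pvPush_sim ids v sA sB hinv hv
    obtain ⟨hinv2, hstk2, hseen2⟩ := pvFold_sim ids (pvDfsA adj fuel) (pvDfsB ids adj fuel)
      (fun v' sA' sB' h hw => ih v' sA' sB' h hw) (pvAdjGet adj v) _ _ hpush
    have hvseen2 : v ∈ ((pvAdjGet adj v).foldl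
        (pvStepB ids (pvDfsB ids adj fuel))
        ⟨PySem.Set.add sB.seen v, sB.pos.insert v sB.stack.length,
         sB.stack ++ [v], sB.intervals, sB.inCycle⟩).seen := by
      apply hseen2
      rw [PySem.Set.mem_add]
      exact Or.inr rfl
    have hpop := pvPop_sim ids v sA.stack _ _ hinv2 (by rw [hstk2]) hvseen2
    refine ⟨?_, ?_, ?_⟩
    · show pvInv ids ⟨_, _, _⟩ ⟨_, _, _, _, _⟩
      exact hpop
    · show (⟨_, _, (_ : PvStA).stack.dropLast⟩ : PvStA).stack = sA.stack
      rw [hstk2]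
      exact List.dropLast_concat
    · intro x hx
      show x ∈ ((pvAdjGet adj v).foldl (pvStepB ids (pvDfsB ids adj fuel)) _).seen
      apply hseen2
      rw [PySem.Set.mem_add]
      exact Or.inl hx

lemma pvColor0_getD (l : List Int) (d : PySem.Dict Int Int) (w : Int) :
    (l.foldl (fun d nid => d.insert nid 0) d).getD w 2
      = if w ∈ l then 0 else d.getD w 2 := by
  induction l generalizing d with
  | nil => simp
  | cons x t ih =>
    simp only [List.foldl_cons, ih, PySem.Dict.getD_insert, List.mem_cons]
    by_cases hx : w = x <;> by_cases ht : w ∈ t <;> simp [hx, ht]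

-- the outer "for nid in all_ids" loop preserves the invariant
lemma pvOuter_sim (ids : PySem.Set Int) (adj : List (Int × List Int)) (fuel : Nat) :
    ∀ (l : List Int) (sA : PvStA) (sB : PvStB), pvInv ids sA sB → (∀ x ∈ l, x ∈ ids) →
    pvInv ids
      (l.foldl (fun s nid => if s.color.getD nid 2 = 0 then pvDfsA adj fuel nid s else s) sA)
      (l.foldl (fun s nid => if nid ∉ s.seen then pvDfsB ids adj fuel nid s else s) sB) := by
  intro l
  induction l with
  | nil => exact fun sA sB h _ => h
  | cons nid t ih =>
    intro sA sB hinv hl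
    have hwhite := hinv.2.2.2.2.2.1
    simp only [List.foldl_cons]
    by_cases hs : nid ∈ sB.seen
    · have hA : ¬ sA.color.getD nid 2 = 0 := fun hc => ((hwhite nid).mp hc).2 hs
      rw [if_neg hA, if_neg (by simpa using hs)]
      exact ih sA sB hinv (fun x hx => hl x (List.mem_cons_of_mem _ hx))
    · have hA : sA.color.getD nid 2 = 0 :=
        (hwhite nid).mpr ⟨hl nid List.mem_cons_self, hs⟩
      rw [if_pos hA, if_pos hs]
      exact ih _ _ (pvDfs_sim ids adj fuel nid sA sB hinv hA).1
        (fun x hx => hl x (List.mem_cons_of_mem _ hx))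

-- the invariant holds for the initial states of the two programs
lemma pvInit_inv (all_ids : List Int) :
    pvInv (PySem.Set.ofList all_ids)
      ⟨all_ids.foldl (fun d nid => d.insert nid 0) PySem.Dict.empty, PySem.Set.empty, []⟩
      ⟨PySem.Set.empty, PySem.Dict.empty, [], [], PySem.Set.empty⟩ := by
  refine ⟨rfl, rfl, List.nodup_nil, ?_, ?_, ?_, trivial, ?_, ?_⟩
  · intro w
    rw [pvColor0_getD]
    simp only [PySem.Dict.getD_empty, List.not_mem_nil, iff_false]
    split <;> omega
  · intro w
    rfl
  · intro w
    rw [pvColor0_getD]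
    simp only [PySem.Dict.getD_empty]
    constructor
    · intro h
      refine ⟨?_, by simp [PySem.Set.empty]⟩
      rw [PySem.Set.mem_ofList]
      by_contra hc
      simp [hc] at h
    · rintro ⟨h1, _⟩
      rw [PySem.Set.mem_ofList] at h1
      simp [h1]
  · intro p hp
    simp at hp
  · intro x hx
    simp [PySem.Set.empty] at hx

-- ===== VERDICT (by name: the statement is the Claim_ definition above) =====
theorem find_cycle_nodes_spec : Claim_equal_find_cycle_nodes := by
  intro all_ids adj _
  unfold Spec_find_cycle_nodes find_cycle_nodes find_cycle_nodes_alt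
  exact (pvOuter_sim (PySem.Set.ofList all_ids) adj all_ids.length all_ids _ _
    (pvInit_inv all_ids)
    (fun x hx => (PySem.Set.mem_ofList _ _).mpr hx)).2.1.symm
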